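-- pv_equiv track=rewrite | github.com/a616099/car_configuration | ycconfig/ycconfig/spiders/Ycconfig_Spider.py | chooseline
-- ===== SOURCE A (Python) =====
-- def chooseline(n, ind):
--     l_n = ind.keys()
--
--     for i,o in enumerate(l_n):
--         if i+1 == len(l_n):
--             return ind[list(l_n)[i]]
--             pass
--         if n in range(o+1,list(l_n)[i+1]):
--             return ind[list(l_n)[i]]
-- ===== SOURCE B (Python) =====
-- def chooseline(n, ind):
--     items = list(ind.items())
--     nxt, ans = items[-1]
--     for k, v in reversed(items[:-1]):
--         if k < n < nxt:
--             ans = v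
--         nxt = k
--     return ans
-- ===== Notes on version B (the rewrite author's own statement) =====
-- stated objective: alternative
-- what changed: B replaces A's forward first-match-and-early-return scan (which rebuilds list(keys) and a range object on every iteration) by a single right-to-left pass with a (next-key, answer) accumulator that overwrites on a match so the leftmost matching interval wins; Pre_ excludes the empty dict (A returns None, not a str) and association lists with duplicate keys (a Python dict cannot hold them, so the assoc-list model is not the dict there).
-- outside the precondition, e.g. on chooseline(0, {}): A returns None, B raises IndexError
import Mathlib
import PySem

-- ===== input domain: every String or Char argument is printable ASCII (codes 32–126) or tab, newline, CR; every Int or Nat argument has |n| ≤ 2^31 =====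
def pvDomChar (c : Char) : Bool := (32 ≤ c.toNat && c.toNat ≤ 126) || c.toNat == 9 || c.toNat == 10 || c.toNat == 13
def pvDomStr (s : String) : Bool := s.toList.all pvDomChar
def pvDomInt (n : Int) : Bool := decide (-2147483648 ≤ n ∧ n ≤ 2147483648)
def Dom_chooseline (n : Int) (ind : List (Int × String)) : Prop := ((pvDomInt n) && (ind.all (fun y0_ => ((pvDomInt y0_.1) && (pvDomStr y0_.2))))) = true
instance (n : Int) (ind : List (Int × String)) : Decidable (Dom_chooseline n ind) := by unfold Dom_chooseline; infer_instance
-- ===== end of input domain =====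

-- B replaces A's forward first-match scan (rebuilding list(keys) and a range each iteration)
-- by one right-to-left pass with a (next-key, answer) accumulator (objective: alternative).

-- ===== PORT A =====
-- ind[k]: first-match association-list lookup (under Pre_ the key is present and keys are unique)
def pvLookup (ind : List (Int × String)) (k : Int) : String :=
  match ind with
  | [] => ""
  | (k', v) :: rest => if k' = k then v else pvLookup rest k

-- the 'for i,o in enumerate(l_n)' loop of A, step for step
def chooselineA_go (n : Int) (ind : List (Int × String)) (keys : List Int) :
    List (Int × Int) → String
  | [] => ""   -- loop falls through: Python returns None (excluded by Pre_, ind ≠ [])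
  | (i, o) :: rest =>
    if i + 1 = (keys.length : Int) then
      pvLookup ind (PySem.List.pyGetD keys i 0)   -- ind[list(l_n)[i]]
    else if o + 1 ≤ n ∧ n < PySem.List.pyGetD keys (i + 1) 0 then  -- n in range(o+1, list(l_n)[i+1])
      pvLookup ind (PySem.List.pyGetD keys i 0)
    else chooselineA_go n ind keys rest

def chooseline (n : Int) (ind : List (Int × String)) : String :=
  let keys := ind.map Prod.fst
  chooselineA_go n ind keys (PySem.List.enumerate keys)

-- ===== PORT B =====
-- Source B: nxt, ans = items[-1]; for k, v in reversed(items[:-1]): if k < n < nxt: ans = v; nxt = k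
def chooseline_alt (n : Int) (ind : List (Int × String)) : String :=
  let items := ind
  let start := PySem.List.pyGetD items (-1) (0, "")          -- items[-1]; empty excluded by Pre_
  let st := (PySem.List.slice items none (some (-1))).reverse.foldl   -- reversed(items[:-1])
      (fun (st : Int × String) (kv : Int × String) =>
        (kv.1, if kv.1 < n ∧ n < st.1 then kv.2 else st.2)) start
  st.2

-- ===== PRECONDITION & SPEC =====
-- Pre_ excludes the empty dict (A returns None, not a str) and association lists with
-- duplicate keys (a Python dict cannot hold them; the assoc-list model is not the dict there).
def Pre_chooseline (n : Int) (ind : List (Int × String)) : Prop :=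
  ind ≠ [] ∧ (ind.map Prod.fst).Nodup
instance (n : Int) (ind : List (Int × String)) : Decidable (Pre_chooseline n ind) := by
  unfold Pre_chooseline; infer_instance
def pvWitness_chooseline : Int × (List (Int × String)) := (5, [(1, "a"), (4, "b"), (9, "c")])

def Spec_chooseline (n : Int) (ind : List (Int × String)) (out : String) : Prop := out = chooseline_alt n ind
instance (n : Int) (ind : List (Int × String)) (out : String) : Decidable (Spec_chooseline n ind out) := by unfold Spec_chooseline; infer_instance

-- ===== CLAIM (what is proved, stated in full; the proofs are below) =====
def Claim_equal_chooseline : Prop := ∀ (n : Int) (ind : List (Int × String)), Dom_chooseline n ind → Pre_chooseline n ind → Spec_chooseline n ind (chooseline n ind)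

-- ===== LEMMAS AND PROOFS =====

-- proof-side reference function: first adjacent pair (k, k2) with k < n < k2 wins, else last value
def specGo (n : Int) : List (Int × String) → String
  | [] => ""
  | [(_, v)] => v
  | (k, v) :: (k2, v2) :: rest =>
    if k + 1 ≤ n ∧ n < k2 then v else specGo n ((k2, v2) :: rest)

theorem pvLookup_append (pre : List (Int × String)) (k : Int) (v : String)
    (tl : List (Int × String)) (h : k ∉ pre.map Prod.fst) :
    pvLookup (pre ++ (k, v) :: tl) k = v := by
  induction pre with
  | nil => simp [pvLookup]
  | cons p ps ih =>
    obtain ⟨k', v'⟩ := p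
    simp only [List.map_cons, List.mem_cons] at h
    push_neg at h
    simpa [pvLookup, Ne.symm h.1] using ih h.2

-- invariant of A's loop: after |pre| iterations the remaining enumerate entries are those of
-- the suffix, and A's loop on them computes the reference pass over the suffix
theorem chooseline_main (n : Int) :
    ∀ (suf pre : List (Int × String)),
      ((pre ++ suf).map Prod.fst).Nodup →
      chooselineA_go n (pre ++ suf) ((pre ++ suf).map Prod.fst)
          (PySem.List.enumerate (suf.map Prod.fst) (pre.length : Int))
        = specGo n suf := by
  intro suf
  induction suf with
  | nil => intro pre _; simp [PySem.List.enumerate_nil, chooselineA_go, specGo]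
  | cons hd tl ih =>
    intro pre hnd
    obtain ⟨k, v⟩ := hd
    have hk : k ∉ pre.map Prod.fst := by
      intro hmem
      simp only [List.map_append, List.map_cons, List.nodup_append] at hnd
      exact hnd.2.2 k hmem k (by simp) rfl
    simp only [List.map_cons]
    match tl with
    | [] =>
      simp only [PySem.List.enumerate_cons, List.map_nil, PySem.List.enumerate_nil]
      have hlen : ((pre.length : Int)) + 1 = (((pre ++ [(k, v)]).map Prod.fst).length : Int) := by
        simp
      have hget : PySem.List.pyGetD ((pre ++ [(k, v)]).map Prod.fst) (pre.length : Int) 0 = k := by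
        simp [PySem.List.pyGetD_natCast, List.map_append, List.getD_eq_getElem?_getD]
      simp only [chooselineA_go]
      rw [if_pos hlen, hget, pvLookup_append pre k v [] hk]
      rfl
    | (k2, v2) :: rest =>
      rw [PySem.List.enumerate_cons]
      have hlen : ¬ ((pre.length : Int) + 1
          = (((pre ++ (k, v) :: (k2, v2) :: rest).map Prod.fst).length : Int)) := by
        simp; omega
      have hget1 : PySem.List.pyGetD ((pre ++ (k, v) :: (k2, v2) :: rest).map Prod.fst)
          (pre.length : Int) 0 = k := by
        simp [PySem.List.pyGetD_natCast, List.map_append, List.getD_eq_getElem?_getD]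
      have hget2 : PySem.List.pyGetD ((pre ++ (k, v) :: (k2, v2) :: rest).map Prod.fst)
          ((pre.length : Int) + 1) 0 = k2 := by
        have h1 : ((pre.length : Int) + 1) = (((pre.length + 1 : Nat)) : Int) := by push_cast; ring
        rw [h1, PySem.List.pyGetD_natCast]
        simp [List.map_append, List.getD_eq_getElem?_getD, List.getElem?_append_right]
      simp only [chooselineA_go]
      rw [if_neg hlen, hget1, hget2]
      by_cases hc : k + 1 ≤ n ∧ n < k2
      · rw [if_pos hc, pvLookup_append pre k v _ hk]
        simp only [specGo]
        rw [if_pos hc]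
      · rw [if_neg hc]
        have hre : pre ++ (k, v) :: (k2, v2) :: rest
            = (pre ++ [(k, v)]) ++ (k2, v2) :: rest := by simp
        have hlen2 : (pre.length : Int) + 1 = (((pre ++ [(k, v)]).length : Nat) : Int) := by
          simp
        rw [hlen2, hre]
        rw [ih (pre ++ [(k, v)]) (by rw [← hre]; exact hnd)]
        simp only [specGo]
        rw [if_neg hc]

-- B's right-to-left overwriting fold equals the forward first-match reference function:
-- the state after folding reversed xs over base (kl, vl) is (first key, answer of xs ++ [(kl,vl)])
theorem foldB (n : Int) :
    ∀ (xs : List (Int × String)) (kl : Int) (vl : String),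
      xs.reverse.foldl
          (fun (st : Int × String) (kv : Int × String) =>
            (kv.1, if kv.1 < n ∧ n < st.1 then kv.2 else st.2)) (kl, vl)
        = (((xs ++ [(kl, vl)]).headD (kl, vl)).1, specGo n (xs ++ [(kl, vl)])) := by
  intro xs
  induction xs with
  | nil => intro kl vl; simp [specGo]
  | cons hd tl ih =>
    intro kl vl
    obtain ⟨k, v⟩ := hd
    rw [List.reverse_cons, List.foldl_append, ih kl vl]
    simp only [List.foldl_cons, List.foldl_nil, List.cons_append, List.headD_cons]
    match tl with
    | [] =>
      simp only [List.nil_append, List.headD_cons, specGo]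
      congr 1
    | (k2, v2) :: rest =>
      simp only [List.cons_append, List.headD_cons, specGo]
      congr 1

theorem alt_eq_specGo (n : Int) (ind : List (Int × String)) (h : ind ≠ []) :
    chooseline_alt n ind = specGo n ind := by
  unfold chooseline_alt
  simp only [PySem.List.slice_to_neg_one, PySem.List.pyGetD_neg_one _ _ h]
  rw [foldB n ind.dropLast (ind.getLast h).1 (ind.getLast h).2]
  simp [List.dropLast_append_getLast h]

-- ===== VERDICT (by name: the statement is the Claim_ definition above) =====
theorem chooseline_spec : Claim_equal_chooseline := by
  intro n ind _ hpre
  unfold Spec_chooseline chooseline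
  rw [alt_eq_specGo n ind hpre.1]
  have := chooseline_main n ind [] (by simpa using hpre.2)
  simpa [PySem.List.enumerate] using this
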